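-- pv_equiv track=rewrite | github.com/techartorg/Advent_of_Code_2020 | jeff_hanna/12.py | _move_boat
-- ===== SOURCE A (Python) =====
-- def _move_boat( boat_pos_e, boat_pos_n, wp_pos_e, wp_pos_n, dist ):
--     # calculate realtive distance from boat to waypoint.
--     r_dist_e = wp_pos_e - boat_pos_e
--     r_dist_n = wp_pos_n - boat_pos_n
--     for d in range( abs ( dist ) ):
--         boat_pos_e += r_dist_e
--         boat_pos_n += r_dist_n
--
--     wp_pos_e = boat_pos_e + r_dist_e
--     wp_pos_n = boat_pos_n + r_dist_n
--
--     return ( boat_pos_e, boat_pos_n, wp_pos_e, wp_pos_n )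
-- ===== SOURCE B (Python) =====
-- def _move_boat(boat_pos_e, boat_pos_n, wp_pos_e, wp_pos_n, dist):
--     # Closed form: the boat jumps abs(dist) times by the fixed relative offset.
--     r_dist_e = wp_pos_e - boat_pos_e
--     r_dist_n = wp_pos_n - boat_pos_n
--     k = abs(dist)
--     e = boat_pos_e + k * r_dist_e
--     n = boat_pos_n + k * r_dist_n
--     return (e, n, e + r_dist_e, n + r_dist_n)
-- ===== Notes on version B (the rewrite author's own statement) =====
-- stated objective: faster
-- what changed: Replaces the abs(dist)-iteration accumulation loop by a closed-form multiplication boat + abs(dist) * relative_offset.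
import Mathlib
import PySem

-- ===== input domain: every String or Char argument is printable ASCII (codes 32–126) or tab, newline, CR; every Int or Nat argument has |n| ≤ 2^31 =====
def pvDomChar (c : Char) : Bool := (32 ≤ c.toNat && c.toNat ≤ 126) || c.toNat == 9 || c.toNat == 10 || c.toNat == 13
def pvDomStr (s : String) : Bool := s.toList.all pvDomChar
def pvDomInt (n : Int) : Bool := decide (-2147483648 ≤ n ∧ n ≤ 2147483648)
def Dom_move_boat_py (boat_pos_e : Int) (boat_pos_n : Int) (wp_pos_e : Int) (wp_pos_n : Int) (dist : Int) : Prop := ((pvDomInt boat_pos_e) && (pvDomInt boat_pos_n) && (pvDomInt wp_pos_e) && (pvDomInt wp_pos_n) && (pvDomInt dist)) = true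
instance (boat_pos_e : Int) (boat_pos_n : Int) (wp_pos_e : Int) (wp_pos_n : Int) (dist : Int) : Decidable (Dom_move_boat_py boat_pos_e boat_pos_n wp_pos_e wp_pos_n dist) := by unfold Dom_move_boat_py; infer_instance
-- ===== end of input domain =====

-- ===== PORT A =====
-- B replaces A's O(|dist|) accumulation loop by a closed-form multiplication (faster).
def move_boat_py (boat_pos_e : Int) (boat_pos_n : Int) (wp_pos_e : Int) (wp_pos_n : Int) (dist : Int) : List Int :=
  let r_dist_e := wp_pos_e - boat_pos_e
  let r_dist_n := wp_pos_n - boat_pos_n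
  let st := (PySem.List.pyRange 0 (|dist|) 1).foldl
    (fun (s : Int × Int) _ => (s.1 + r_dist_e, s.2 + r_dist_n)) (boat_pos_e, boat_pos_n)
  [st.1, st.2, st.1 + r_dist_e, st.2 + r_dist_n]

-- ===== PORT B =====
def move_boat_py_alt (boat_pos_e : Int) (boat_pos_n : Int) (wp_pos_e : Int) (wp_pos_n : Int) (dist : Int) : List Int :=
  let r_dist_e := wp_pos_e - boat_pos_e
  let r_dist_n := wp_pos_n - boat_pos_n
  let k : Int := |dist|
  let e := boat_pos_e + k * r_dist_e
  let n := boat_pos_n + k * r_dist_n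
  [e, n, e + r_dist_e, n + r_dist_n]

-- ===== PRECONDITION & SPEC =====
def Spec_move_boat_py (boat_pos_e : Int) (boat_pos_n : Int) (wp_pos_e : Int) (wp_pos_n : Int) (dist : Int) (out : List Int) : Prop := out = move_boat_py_alt boat_pos_e boat_pos_n wp_pos_e wp_pos_n dist
instance (boat_pos_e : Int) (boat_pos_n : Int) (wp_pos_e : Int) (wp_pos_n : Int) (dist : Int) (out : List Int) : Decidable (Spec_move_boat_py boat_pos_e boat_pos_n wp_pos_e wp_pos_n dist out) := by unfold Spec_move_boat_py; infer_instance

-- ===== CLAIM (what is proved, stated in full; the proofs are below) =====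
def Claim_equal_move_boat_py : Prop := ∀ (boat_pos_e : Int) (boat_pos_n : Int) (wp_pos_e : Int) (wp_pos_n : Int) (dist : Int), Dom_move_boat_py boat_pos_e boat_pos_n wp_pos_e wp_pos_n dist → Spec_move_boat_py boat_pos_e boat_pos_n wp_pos_e wp_pos_n dist (move_boat_py boat_pos_e boat_pos_n wp_pos_e wp_pos_n dist)

-- ===== LEMMAS AND PROOFS =====

-- ===== VERDICT (by name: the statement is the Claim_ definition above) =====
theorem foldl_const_add (re rn : Int) (l : List Int) (e n : Int) :
    l.foldl (fun (s : Int × Int) _ => (s.1 + re, s.2 + rn)) (e, n)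
      = (e + (l.length : Int) * re, n + (l.length : Int) * rn) := by
  induction l generalizing e n with
  | nil => simp
  | cons x xs ih =>
      simp only [List.foldl_cons, ih, List.length_cons]
      refine Prod.ext ?_ ?_ <;> (push_cast; ring)

theorem move_boat_py_spec : Claim_equal_move_boat_py := by
  intro e n we wn d _
  unfold Spec_move_boat_py move_boat_py move_boat_py_alt
  simp only [foldl_const_add, PySem.List.length_pyRange_one]
  have h : (((|d| - 0).toNat : Int)) = |d| := by
    have := abs_nonneg d; omega
  rw [h]
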